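-- pv_equiv track=rewrite | github.com/AdamZhouSE/pythonHomework | Code/CodeRecords/2866/60673/285544.py | satic
-- ===== SOURCE A (Python) =====
-- def satic(fir, nums, inp, sum1):
--     if (nums[inp - 1] == 1): sum1 -= 1
--     res = []
--     temp = 1
--     for i in range(fir + 1, inp):
--         if (nums[i] == 1):
--             res.append(temp)
--             temp = 1
--         else:
--             temp += 1
--     return (res)
-- ===== SOURCE B (Python) =====
-- def satic(fir, nums, inp, sum1):
--     if (nums[inp - 1] == 1): sum1 -= 1
--     pos = [i for i in range(fir + 1, inp) if nums[i] == 1]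
--     if not pos:
--         return []
--     return [pos[0] - fir] + [b - a for a, b in zip(pos, pos[1:])]
-- ===== Notes on version B (the rewrite author's own statement) =====
-- stated objective: alternative
-- what changed: Replaces A's single sweep with a running gap counter (temp reset at each 1) by collecting the indices of 1s in the slice and returning the adjacent differences (first measured from fir).
import Mathlib
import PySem

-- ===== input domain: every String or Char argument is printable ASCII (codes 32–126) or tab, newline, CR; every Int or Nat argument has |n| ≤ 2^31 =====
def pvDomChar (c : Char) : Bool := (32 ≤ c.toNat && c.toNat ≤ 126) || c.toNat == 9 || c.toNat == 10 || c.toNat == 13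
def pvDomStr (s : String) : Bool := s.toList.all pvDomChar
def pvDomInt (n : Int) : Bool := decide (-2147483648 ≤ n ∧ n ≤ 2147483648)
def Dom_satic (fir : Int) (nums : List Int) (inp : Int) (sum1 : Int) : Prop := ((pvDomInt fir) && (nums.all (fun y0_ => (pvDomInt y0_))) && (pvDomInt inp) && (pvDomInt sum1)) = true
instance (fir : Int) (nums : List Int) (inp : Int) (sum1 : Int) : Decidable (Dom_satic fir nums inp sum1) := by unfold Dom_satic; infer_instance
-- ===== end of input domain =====

-- B replaces A's single accumulator sweep (running gap counter reset at each 1) by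
-- collect-the-positions-of-1s then take adjacent differences; alternative decomposition, same cost.

-- ===== PORT A =====
-- the for-loop of A as structural recursion over the index list; state = (res, temp)
def saticLoop (nums : List Int) (ixs : List Int) (res : List Int) (temp : Int) : List Int :=
  match ixs with
  | [] => res
  | i :: rest =>
    if PySem.List.pyGet? nums i = some 1 then saticLoop nums rest (res ++ [temp]) 1
    else saticLoop nums rest res (temp + 1)

def satic (fir : Int) (nums : List Int) (inp : Int) (sum1 : Int) : List Int :=
  match PySem.List.pyGet? nums (inp - 1) with
  | none => []  -- IndexError in Python; excluded by Pre_satic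
  | some v =>
    let _sum1 := if v = 1 then sum1 - 1 else sum1
    saticLoop nums (PySem.List.pyRange (fir + 1) inp 1) [] 1

-- ===== PORT B =====
def satic_alt (fir : Int) (nums : List Int) (inp : Int) (sum1 : Int) : List Int :=
  match PySem.List.pyGet? nums (inp - 1) with
  | none => []  -- IndexError in Python; excluded by Pre_satic
  | some v =>
    let _sum1 := if v = 1 then sum1 - 1 else sum1
    let pos := (PySem.List.pyRange (fir + 1) inp 1).filter (fun i => PySem.List.pyGet? nums i = some 1)
    match pos with
    | [] => []
    | p0 :: _ => (p0 - fir) :: (pos.zip (pos.drop 1)).map (fun p => p.2 - p.1)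

-- ===== PRECONDITION & SPEC =====
-- Pre_ excludes exactly the inputs where Python A raises IndexError: nums[inp-1] out of
-- range, or some loop index i in range(fir+1, inp) out of range (negative indices wrap).
def Pre_satic (fir : Int) (nums : List Int) (inp : Int) (sum1 : Int) : Prop :=
  (-(nums.length : Int) ≤ inp - 1 ∧ inp - 1 < (nums.length : Int)) ∧
  (fir + 1 < inp → (-(nums.length : Int) ≤ fir + 1 ∧ inp ≤ (nums.length : Int)))
instance (fir : Int) (nums : List Int) (inp : Int) (sum1 : Int) : Decidable (Pre_satic fir nums inp sum1) := by unfold Pre_satic; infer_instance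
def pvWitness_satic : Int × List Int × Int × Int := (0, [1, 0, 1], 3, 0)
def Spec_satic (fir : Int) (nums : List Int) (inp : Int) (sum1 : Int) (out : List Int) : Prop := out = satic_alt fir nums inp sum1
instance (fir : Int) (nums : List Int) (inp : Int) (sum1 : Int) (out : List Int) : Decidable (Spec_satic fir nums inp sum1 out) := by unfold Spec_satic; infer_instance

-- ===== CLAIM (what is proved, stated in full; the proofs are below) =====
def Claim_equal_satic : Prop := ∀ (fir : Int) (nums : List Int) (inp : Int) (sum1 : Int), Dom_satic fir nums inp sum1 → Pre_satic fir nums inp sum1 → Spec_satic fir nums inp sum1 (satic fir nums inp sum1)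

-- ===== LEMMAS AND PROOFS =====

-- the gap list B builds from a position list, head measured from base `a` with offset `t`
def gaps (pos : List Int) (a t : Int) : List Int :=
  match pos with
  | [] => []
  | p0 :: _ => (t + (p0 - a)) :: (pos.zip (pos.drop 1)).map (fun p => p.2 - p.1)

theorem loop_range (nums : List Int) : ∀ (n : ℕ) (a : Int) (res : List Int) (t : Int),
    saticLoop nums (PySem.List.pyRange a (a + n) 1) res t =
      res ++ gaps ((PySem.List.pyRange a (a + n) 1).filter (fun i => PySem.List.pyGet? nums i = some 1)) a t := by
  intro n
  induction n with
  | zero =>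
    intro a res t
    rw [PySem.List.pyRange_one_eq_nil (by omega)]
    simp [saticLoop, gaps]
  | succ n ih =>
    intro a res t
    rw [PySem.List.pyRange_one_cons (by omega : a < a + (n + 1 : ℕ))]
    have hshift : (a : Int) + (n + 1 : ℕ) = (a + 1) + (n : ℕ) := by push_cast; ring
    by_cases h : PySem.List.pyGet? nums a = some 1
    · simp only [saticLoop, if_pos h, List.filter_cons, h, decide_true]
      rw [hshift, ih]
      rcases hpos : (PySem.List.pyRange (a + 1) ((a + 1) + (n : ℕ)) 1).filter
          (fun i => PySem.List.pyGet? nums i = some 1) with _ | ⟨p0, rest⟩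
      · simp [gaps]
      · simp only [gaps, if_true, List.drop_succ_cons, List.drop_zero, List.zip_cons_cons,
          List.map_cons, List.cons_append, List.append_assoc, List.nil_append,
          List.singleton_append, List.cons.injEq, List.append_cancel_left_eq]
        refine ⟨by omega, by omega, trivial⟩
    · have hd : (decide (PySem.List.pyGet? nums a = some 1)) = false := by simp [h]
      simp only [saticLoop, List.filter_cons, hd, if_neg h, Bool.false_eq_true, if_false]
      rw [hshift, ih]
      rcases hpos : (PySem.List.pyRange (a + 1) ((a + 1) + (n : ℕ)) 1).filter
          (fun i => PySem.List.pyGet? nums i = some 1) with _ | ⟨p0, rest⟩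
      · simp [gaps]
      · simp only [gaps, List.cons.injEq, List.append_cancel_left_eq]
        refine ⟨by omega, trivial⟩

theorem satic_eq (fir : Int) (nums : List Int) (inp : Int) (sum1 : Int) :
    satic fir nums inp sum1 = satic_alt fir nums inp sum1 := by
  unfold satic satic_alt
  cases hg : PySem.List.pyGet? nums (inp - 1) with
  | none => rfl
  | some v =>
    simp only
    by_cases hlt : fir + 1 < inp
    · have hn : inp = (fir + 1) + ((inp - (fir + 1)).toNat : ℕ) := by omega
      rw [hn, loop_range]
      rcases hpos : (PySem.List.pyRange (fir + 1) ((fir + 1) + ((inp - (fir + 1)).toNat : ℕ)) 1).filter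
          (fun i => PySem.List.pyGet? nums i = some 1) with _ | ⟨p0, rest⟩
      · simp [gaps]
      · simp only [gaps, List.nil_append, List.cons.injEq]
        refine ⟨by omega, trivial⟩
    · rw [PySem.List.pyRange_one_eq_nil (by omega)]
      simp [saticLoop]

-- ===== VERDICT (by name: the statement is the Claim_ definition above) =====
theorem satic_spec : Claim_equal_satic := by
  intro fir nums inp sum1 _ _
  unfold Spec_satic
  exact satic_eq fir nums inp sum1
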